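-- pv_equiv track=rewrite | github.com/NYKK3/GTA5-Comandi-Vocali | scripts/gta5commands.py | _words_in_text
-- ===== SOURCE A (Python) =====
-- def _words_in_text(command_words, text_words):
--     """
--     Controlla se tutte le parole del comando sono presenti nel testo in ordine.
--     Permette parole extra tra le parole del comando e parole parziali (es. "inviare" per "invia").
--
--     Args:
--         command_words: Lista di parole del comando
--         text_words: Lista di parole del testo riconosciuto
--
--     Returns:
--         bool: True se tutte le parole del comando sono presenti in ordine
--     """
--     if not command_words:
--         return False
--
--     text_idx = 0
--     cmd_idx = 0
--
--     while text_idx < len(text_words) and cmd_idx < len(command_words):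
--         # Controlla se la parola corrisponde esattamente o inizia con la parola del comando
--         if (text_words[text_idx] == command_words[cmd_idx] or
--             text_words[text_idx].startswith(command_words[cmd_idx])):
--             cmd_idx += 1
--         text_idx += 1
--
--     return cmd_idx == len(command_words)
-- ===== SOURCE B (Python) =====
-- def _word_positions(cw, text_words):
--     # all indices in the text whose word starts with cw (sorted increasing by construction)
--     return [i for i, w in enumerate(text_words) if w.startswith(cw)]
--
--
-- def _bisect_left(a, x):
--     # hand-rolled bisect_left (A imports nothing, so no bisect module)
--     lo, hi = 0, len(a)
--     while lo < hi:
--         mid = (lo + hi) // 2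
--         if a[mid] < x:
--             lo = mid + 1
--         else:
--             hi = mid
--     return lo
--
--
-- def _words_in_text(command_words, text_words):
--     if not command_words:
--         return False
--     cur = 0
--     for cw in command_words:
--         positions = _word_positions(cw, text_words)
--         j = _bisect_left(positions, cur)
--         if j == len(positions):
--             return False
--         cur = positions[j] + 1
--     return True
-- ===== Notes on version B (the rewrite author's own statement) =====
-- stated objective: alternative
-- what changed: Instead of one shared forward scan over the text, B builds for each command word the full sorted list of matching text indices and selects the first admissible one by hand-rolled binary search (bisect_left) over a running lower bound.
import Mathlib
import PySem

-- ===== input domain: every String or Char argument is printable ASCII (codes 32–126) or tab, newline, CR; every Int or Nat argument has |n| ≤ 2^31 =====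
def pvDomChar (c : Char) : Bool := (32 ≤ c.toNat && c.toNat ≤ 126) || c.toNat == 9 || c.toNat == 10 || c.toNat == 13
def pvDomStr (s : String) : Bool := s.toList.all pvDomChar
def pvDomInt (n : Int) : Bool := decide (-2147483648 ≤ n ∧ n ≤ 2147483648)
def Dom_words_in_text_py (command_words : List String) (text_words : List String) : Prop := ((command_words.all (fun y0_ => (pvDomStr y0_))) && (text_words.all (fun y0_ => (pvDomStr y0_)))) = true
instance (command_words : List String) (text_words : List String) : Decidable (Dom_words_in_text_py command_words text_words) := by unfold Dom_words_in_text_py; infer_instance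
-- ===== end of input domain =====

-- B replaces A's single shared forward scan by per-command-word match-position lists searched with a hand-rolled bisect_left (alternative algorithm, same results).

-- ===== PORT A =====
-- the while loop of A, carried by the two indices text_idx and cmd_idx
def pvALoop (command_words : List String) (text_words : List String)
    (text_idx cmd_idx : Nat) : Nat :=
  if h : text_idx < text_words.length ∧ cmd_idx < command_words.length then
    if text_words[text_idx] == command_words[cmd_idx]
        || PySem.Str.startswith text_words[text_idx] command_words[cmd_idx] then
      pvALoop command_words text_words (text_idx + 1) (cmd_idx + 1)
    else
      pvALoop command_words text_words (text_idx + 1) cmd_idx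
  else cmd_idx
termination_by text_words.length - text_idx
decreasing_by all_goals omega

def words_in_text_py (command_words : List String) (text_words : List String) : Bool :=
  if command_words.isEmpty then false
  else pvALoop command_words text_words 0 0 == command_words.length

-- ===== PORT B =====
-- `[i for i, w in enumerate(text_words) if w.startswith(cw)]`
def pvPositions (cw : String) (text_words : List String) : List Int :=
  ((PySem.List.enumerate text_words).filter (fun p => PySem.Str.startswith p.2 cw)).map (·.1)

-- the hand-rolled bisect_left of Source B; lo, hi are the Python ints (always ≥ 0 here, so Nat,
-- and (lo+hi)//2 on nonnegatives is Nat division); a[mid] is always in range when hi ≤ len,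
-- getD 0 is its total reading
def pvBisect (a : List Int) (x : Int) (lo hi : Nat) : Nat :=
  if lo < hi then
    if a.getD ((lo + hi) / 2) 0 < x then pvBisect a x ((lo + hi) / 2 + 1) hi
    else pvBisect a x lo ((lo + hi) / 2)
  else lo
termination_by hi - lo
decreasing_by all_goals omega

-- the `for cw in command_words` loop with accumulator cur
def pvBGo (text_words : List String) : List String → Int → Bool
  | [], _ => true
  | cw :: cws, cur =>
    let ps := pvPositions cw text_words
    let j := pvBisect ps cur 0 ps.length
    if j == ps.length then false
    else pvBGo text_words cws (ps.getD j 0 + 1)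

def words_in_text_py_alt (command_words : List String) (text_words : List String) : Bool :=
  if command_words.isEmpty then false
  else pvBGo text_words command_words 0

-- ===== PRECONDITION & SPEC =====
def Spec_words_in_text_py (command_words : List String) (text_words : List String) (out : Bool) : Prop := out = words_in_text_py_alt command_words text_words
instance (command_words : List String) (text_words : List String) (out : Bool) : Decidable (Spec_words_in_text_py command_words text_words out) := by unfold Spec_words_in_text_py; infer_instance

-- ===== CLAIM (what is proved, stated in full; the proofs are below) =====
def Claim_equal_words_in_text_py : Prop := ∀ (command_words : List String) (text_words : List String), Dom_words_in_text_py command_words text_words → Spec_words_in_text_py command_words text_words (words_in_text_py command_words text_words)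

-- ===== LEMMAS AND PROOFS =====

-- proof-side middle form: the ordered greedy subsequence check as structural recursion
def pvBAny (cw : String) (it : List String) : Option (List String) :=
  match it with
  | [] => none
  | w :: rest => if PySem.Str.startswith w cw then some rest else pvBAny cw rest

def pvBAll (command_words : List String) (it : List String) : Bool :=
  match command_words with
  | [] => true
  | cw :: cws =>
    match pvBAny cw it with
    | none => false
    | some rest => pvBAll cws rest

-- A's "equal or startswith" condition collapses to startswith
theorem pv_cond_eq (w c : String) :
    (w == c || PySem.Str.startswith w c) = PySem.Str.startswith w c := by
  by_cases h : w = c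
  · subst h
    simp [PySem.Chars.startswith_iff]
  · simp [h]

theorem pvBAll_skip (cw : String) (cws it : List String) (w : String)
    (h : PySem.Str.startswith w cw = false) :
    pvBAll (cw :: cws) (w :: it) = pvBAll (cw :: cws) it := by
  simp only [pvBAll, pvBAny, h, Bool.false_eq_true, if_neg, not_false_iff]

-- A's loop from (ti, ci) decides the same as the greedy middle form on the remaining suffixes
theorem pvALoop_eq_pvBAll (command_words text_words : List String) :
    ∀ ti ci, ci ≤ command_words.length →
    ((pvALoop command_words text_words ti ci == command_words.length) : Bool)
      = pvBAll (command_words.drop ci) (text_words.drop ti) := by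
  intro ti
  induction' hfuel : text_words.length - ti with n ih generalizing ti
  case zero =>
    intro ci hci
    have hti : text_words.length ≤ ti := by omega
    rw [pvALoop]
    have : ¬ (ti < text_words.length ∧ ci < command_words.length) := by omega
    simp only [this, dif_neg, not_false_iff]
    rw [List.drop_eq_nil_of_le hti]
    rcases Nat.lt_or_ge ci command_words.length with h | h
    · obtain ⟨c, cs, hd⟩ : ∃ c cs, command_words.drop ci = c :: cs := by
        cases hdrop : command_words.drop ci with
        | nil => exfalso; have := List.drop_eq_nil_iff.mp hdrop; omega
        | cons c cs => exact ⟨c, cs, rfl⟩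
      rw [hd]
      simp [pvBAll, pvBAny]
      omega
    · have : ci = command_words.length := by omega
      subst this
      simp [List.drop_length, pvBAll]
  case succ =>
    intro ci hci
    have hti : ti < text_words.length := by omega
    by_cases hcl : ci < command_words.length
    · rw [pvALoop]
      simp only [dif_pos (And.intro hti hcl)]
      rw [pv_cond_eq]
      have hdt : text_words.drop ti = text_words[ti] :: text_words.drop (ti + 1) :=
        List.drop_eq_getElem_cons hti
      have hdc : command_words.drop ci = command_words[ci] :: command_words.drop (ci + 1) :=
        List.drop_eq_getElem_cons hcl
      by_cases hm : PySem.Str.startswith text_words[ti] command_words[ci] = true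
      · rw [if_pos hm]
        have hm2 : PySem.Chars.startswith text_words[ti].toList command_words[ci].toList = true := by
          simpa using hm
        rw [ih (ti + 1) (by omega) (ci + 1) (by omega), hdt, hdc]
        simp [pvBAll, pvBAny, hm2]
      · rw [if_neg hm]
        rw [Bool.not_eq_true] at hm
        rw [ih (ti + 1) (by omega) ci hci, hdt, hdc]
        rw [pvBAll_skip _ _ _ _ hm, ← hdc]
    · have : ci = command_words.length := by omega
      subst this
      rw [pvALoop]
      have hno : ¬ (ti < text_words.length ∧ command_words.length < command_words.length) := by omega
      simp only [hno, dif_neg, not_false_iff]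
      simp [List.drop_length, pvBAll]

-- membership in enumerate
theorem pv_mem_enumerate (xs : List String) :
    ∀ (s : Int) (p : Int × String), p ∈ PySem.List.enumerate xs s ↔
      ∃ i : Nat, ∃ h : i < xs.length, p.1 = s + i ∧ p.2 = xs[i] := by
  induction xs with
  | nil => intro s p; simp [PySem.List.enumerate_nil]
  | cons x xs ih =>
    intro s p
    rw [PySem.List.enumerate_cons]
    simp only [List.mem_cons, ih]
    constructor
    · rintro (rfl | ⟨i, h, h1, h2⟩)
      · exact ⟨0, by simp, by simp, by simp⟩
      · exact ⟨i + 1, by simpa using h, by push_cast; omega, by simpa using h2⟩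
    · rintro ⟨i, h, h1, h2⟩
      cases i with
      | zero =>
        left
        obtain ⟨a, b⟩ := p
        simp only [List.length_cons] at h
        simp only [Nat.cast_zero, add_zero] at h1
        simp only [List.getElem_cons_zero] at h2
        simp [h1, h2]
      | succ i =>
        right
        exact ⟨i, by simpa using h, by push_cast at h1 ⊢; omega, by simpa using h2⟩

-- membership characterisation of the positions list
theorem pv_mem_positions (cw : String) (text_words : List String) (z : Int) :
    z ∈ pvPositions cw text_words ↔
      ∃ i : Nat, ∃ h : i < text_words.length,
        z = (i : Int) ∧ PySem.Str.startswith text_words[i] cw = true := by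
  unfold pvPositions
  simp only [List.mem_map, List.mem_filter]
  constructor
  · rintro ⟨p, ⟨hp, hc⟩, rfl⟩
    obtain ⟨i, h, h1, h2⟩ := (pv_mem_enumerate text_words 0 p).mp hp
    exact ⟨i, h, by omega, by rw [← h2]; exact hc⟩
  · rintro ⟨i, h, rfl, hc⟩
    exact ⟨((i : Int), text_words[i]),
      ⟨(pv_mem_enumerate text_words 0 _).mpr ⟨i, h, by simp, rfl⟩, hc⟩, rfl⟩

-- the positions list is strictly increasing
theorem pv_positions_pairwise (cw : String) (text_words : List String) :
    (pvPositions cw text_words).Pairwise (· < ·) := by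
  unfold pvPositions
  have hsub : List.Sublist (((PySem.List.enumerate text_words).filter
      (fun p => PySem.Str.startswith p.2 cw)).map (·.1))
      ((PySem.List.enumerate text_words).map (·.1)) :=
    List.filter_sublist.map _
  have hall : ((PySem.List.enumerate text_words).map (·.1)).Pairwise (· < ·) := by
    rw [PySem.List.map_fst_enumerate]
    exact PySem.List.pairwise_lt_pyRange_one 0 _
  exact hall.sublist hsub

-- monotone getD on a sorted list
theorem pv_getD_mono (a : List Int) (hs : a.Pairwise (· ≤ ·)) :
    ∀ i j, i ≤ j → j < a.length → a.getD i 0 ≤ a.getD j 0 := by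
  intro i j hij hj
  rcases Nat.eq_or_lt_of_le hij with rfl | hlt
  · exact le_refl _
  · rw [List.getD_eq_getElem a 0 (by omega), List.getD_eq_getElem a 0 hj]
    exact List.pairwise_iff_getElem.mp hs i j _ _ hlt

-- invariant proof of the hand-rolled bisect_left
theorem pvBisect_spec (a : List Int) (x : Int) (hs : a.Pairwise (· ≤ ·)) :
    ∀ n lo hi, hi - lo = n → lo ≤ hi → hi ≤ a.length →
    (∀ k, k < lo → a.getD k 0 < x) →
    (∀ k, hi ≤ k → k < a.length → x ≤ a.getD k 0) →
    pvBisect a x lo hi ≤ a.length ∧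
    (∀ k, k < pvBisect a x lo hi → a.getD k 0 < x) ∧
    (∀ k, pvBisect a x lo hi ≤ k → k < a.length → x ≤ a.getD k 0) := by
  intro n
  induction n using Nat.strong_induction_on with
  | _ n ih =>
    intro lo hi hn hlohi hhi hlo_inv hhi_inv
    rw [pvBisect]
    by_cases hlt : lo < hi
    · rw [if_pos hlt]
      have hmid1 : lo ≤ (lo + hi) / 2 := by omega
      have hmid2 : (lo + hi) / 2 < hi := by omega
      by_cases hc : a.getD ((lo + hi) / 2) 0 < x
      · rw [if_pos hc]
        refine ih (hi - ((lo + hi) / 2 + 1)) (by omega) _ _ rfl (by omega) hhi ?_ hhi_inv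
        intro k hk
        calc a.getD k 0 ≤ a.getD ((lo + hi) / 2) 0 :=
              pv_getD_mono a hs k _ (by omega) (by omega)
          _ < x := hc
      · rw [if_neg hc]
        refine ih ((lo + hi) / 2 - lo) (by omega) _ _ rfl (by omega) (by omega) hlo_inv ?_
        intro k hk hk2
        calc x ≤ a.getD ((lo + hi) / 2) 0 := by omega
          _ ≤ a.getD k 0 := pv_getD_mono a hs _ k hk hk2
    · rw [if_neg hlt]
      have : lo = hi := by omega
      subst this
      exact ⟨by omega, hlo_inv, hhi_inv⟩

-- pvBAny returns none when no text word at index ≥ cur matches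
theorem pvBAny_none (cw : String) (text : List String) :
    ∀ cur : Nat, (∀ i (_ : i < text.length), cur ≤ i →
        PySem.Str.startswith text[i] cw = false) →
    pvBAny cw (text.drop cur) = none := by
  intro cur
  induction' hfuel : text.length - cur with n ih generalizing cur
  case zero =>
    intro _
    rw [List.drop_eq_nil_of_le (by omega)]
    rfl
  case succ =>
    intro hno
    have hcur : cur < text.length := by omega
    rw [List.drop_eq_getElem_cons hcur]
    simp only [pvBAny, hno cur hcur (le_refl _), Bool.false_eq_true, if_neg, not_false_iff]
    exact ih (cur + 1) (by omega) (fun i h hi => hno i h (by omega))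

-- pvBAny returns the suffix after the first matching index ≥ cur
theorem pvBAny_some (cw : String) (text : List String) :
    ∀ cur p : Nat, cur ≤ p → ∀ (hp : p < text.length),
    PySem.Str.startswith text[p] cw = true →
    (∀ i (_ : i < text.length), cur ≤ i → i < p →
        PySem.Str.startswith text[i] cw = false) →
    pvBAny cw (text.drop cur) = some (text.drop (p + 1)) := by
  intro cur p
  induction' hfuel : p - cur with n ih generalizing cur
  case zero =>
    intro hle hp hm _
    have : cur = p := by omega
    subst this
    rw [List.drop_eq_getElem_cons hp]
    have hm2 : PySem.Chars.startswith text[cur].toList cw.toList = true := by simpa using hm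
    simp [pvBAny, hm2]
  case succ =>
    intro hle hp hm hmin
    have hcur : cur < text.length := by omega
    rw [List.drop_eq_getElem_cons hcur]
    have hno : PySem.Str.startswith text[cur] cw = false :=
      hmin cur hcur (le_refl _) (by omega)
    simp only [pvBAny, hno, Bool.false_eq_true, if_neg, not_false_iff]
    exact ih (cur + 1) (by omega) (by omega) hp hm
      (fun i h hi hip => hmin i h (by omega) hip)

-- the greedy middle form equals B's positions + bisect loop
theorem pvBAll_eq_pvBGo (text : List String) :
    ∀ (cws : List String) (cur : Nat),
      pvBAll cws (text.drop cur) = pvBGo text cws (cur : Int) := by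
  intro cws
  induction cws with
  | nil => intro cur; rfl
  | cons cw cws ih =>
    intro cur
    have hpw := pv_positions_pairwise cw text
    have hs : (pvPositions cw text).Pairwise (· ≤ ·) := hpw.imp le_of_lt
    set ps := pvPositions cw text with hps
    obtain ⟨hj1, hj2, hj3⟩ := pvBisect_spec ps (cur : Int) hs ps.length 0 ps.length rfl
      (by omega) (le_refl _) (fun k hk => absurd hk (by omega))
      (fun k hk hk2 => by omega)
    set j := pvBisect ps (cur : Int) 0 ps.length with hj
    show pvBAll (cw :: cws) (text.drop cur)
        = if j == ps.length then false else pvBGo text cws (ps.getD j 0 + 1)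
    by_cases hje : j = ps.length
    · rw [if_pos (by simpa using hje)]
      have hnone : pvBAny cw (text.drop cur) = none := by
        apply pvBAny_none
        intro i hi hcuri
        by_contra hm
        rw [Bool.not_eq_false] at hm
        have hmem : ((i : Int)) ∈ ps := (pv_mem_positions cw text _).mpr ⟨i, hi, rfl, hm⟩
        obtain ⟨k, hk, hkeq⟩ := List.mem_iff_getElem.mp hmem
        have := hj2 k (by omega)
        rw [List.getD_eq_getElem ps 0 hk, hkeq] at this
        omega
      simp [pvBAll, hnone]
    · rw [if_neg (by simpa using hje)]
      have hjlen : j < ps.length := by omega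
      have hmem : ps.getD j 0 ∈ ps := by
        rw [List.getD_eq_getElem ps 0 hjlen]
        exact List.getElem_mem hjlen
      obtain ⟨i, hi, hieq, hm⟩ := (pv_mem_positions cw text _).mp hmem
      have hcuri : (cur : Int) ≤ (i : Int) := by rw [← hieq]; exact hj3 j (le_refl _) hjlen
      have hmin : ∀ q (_ : q < text.length), cur ≤ q → q < i →
          PySem.Str.startswith text[q] cw = false := by
        intro q hq hcq hqi
        by_contra hqm
        rw [Bool.not_eq_false] at hqm
        have hqmem : ((q : Int)) ∈ ps := (pv_mem_positions cw text _).mpr ⟨q, hq, rfl, hqm⟩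
        obtain ⟨k, hk, hkeq⟩ := List.mem_iff_getElem.mp hqmem
        rcases Nat.lt_or_ge k j with hkj | hkj
        · have := hj2 k hkj
          rw [List.getD_eq_getElem ps 0 hk, hkeq] at this
          omega
        · have := pv_getD_mono ps hs j k hkj hk
          rw [List.getD_eq_getElem ps 0 hk, hkeq, hieq] at this
          have : (i : Int) ≤ (q : Int) := this
          omega
      have hsome : pvBAny cw (text.drop cur) = some (text.drop (i + 1)) :=
        pvBAny_some cw text cur i (by exact_mod_cast hcuri) hi hm hmin
      have hstep : pvBAll (cw :: cws) (text.drop cur) = pvBAll cws (text.drop (i + 1)) := by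
        simp [pvBAll, hsome]
      rw [hstep, ih (i + 1), hieq]
      norm_num

-- ===== VERDICT (by name: the statement is the Claim_ definition above) =====
theorem words_in_text_py_spec : Claim_equal_words_in_text_py := by
  intro command_words text_words _
  unfold Spec_words_in_text_py words_in_text_py words_in_text_py_alt
  by_cases h : command_words.isEmpty
  · simp [h]
  · rw [if_neg h, if_neg h]
    have h1 := pvALoop_eq_pvBAll command_words text_words 0 0 (by omega)
    have h2 := pvBAll_eq_pvBGo text_words command_words 0
    simp only [List.drop_zero, Nat.cast_zero] at h1 h2
    rw [h1, h2]
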